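-- pv_equiv track=rewrite | github.com/VoXc2/dealix | auto_client_acquisition/delivery_factory/workflow_loader.py | _max_consecutive_run
-- ===== SOURCE A (Python) =====
-- def _max_consecutive_run(missing: tuple[int, ...], total_days: int) -> int:
--     """Compute the longest run of consecutive missing days
--     ending at ``total_days`` (the current day).
--
--     We care most about the trailing run because old missing days
--     might be deliberately skipped (vacation, holiday) but a current
--     streak means the session is stuck NOW.
--     """
--     if not missing:
--         return 0
--     missing_set = set(missing)
--     run = 0
--     d = total_days
--     while d >= 1 and d in missing_set:
--         run += 1
--         d -= 1
--     return run
-- ===== SOURCE B (Python) =====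
-- def _max_consecutive_run(missing, total_days):
--     """Longest run of consecutive missing days ending at total_days.
--
--     Dedup the missing days, keep only those <= total_days, sort them in
--     descending order, and count how far the list walks down from
--     total_days in steps of 1 (never below day 1).
--     """
--     run = 0
--     expected = total_days
--     for v in sorted({v for v in missing if v <= total_days}, reverse=True):
--         if expected >= 1 and v == expected:
--             run += 1
--             expected -= 1
--         else:
--             break
--     return run
-- ===== Notes on version B (the rewrite author's own statement) =====
-- stated objective: alternative
-- what changed: Replaces A's backward day-by-day walk with set-membership tests by deduplicating the missing days <= total_days, sorting them in descending order, and counting the initial consecutive descent from total_days in one linear scan over the values themselves.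
import Mathlib
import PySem

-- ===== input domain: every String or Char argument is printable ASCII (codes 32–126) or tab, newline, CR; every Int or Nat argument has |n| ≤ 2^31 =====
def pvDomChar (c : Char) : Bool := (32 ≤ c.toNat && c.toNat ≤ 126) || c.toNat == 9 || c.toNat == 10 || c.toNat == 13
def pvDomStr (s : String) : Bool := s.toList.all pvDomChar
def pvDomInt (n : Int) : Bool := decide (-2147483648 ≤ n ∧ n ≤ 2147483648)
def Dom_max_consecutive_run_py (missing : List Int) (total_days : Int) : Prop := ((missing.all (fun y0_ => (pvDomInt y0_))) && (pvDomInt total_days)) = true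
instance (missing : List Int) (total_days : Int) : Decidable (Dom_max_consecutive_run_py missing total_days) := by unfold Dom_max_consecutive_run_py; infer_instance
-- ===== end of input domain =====

-- B replaces A's set-membership backward walk with a filter/dedup/descending-sort
-- followed by one linear scan over the missing values themselves (objective: alternative).

-- ===== PORT A =====
-- the 'while d >= 1 and d in missing_set: run += 1; d -= 1' loop
def pvALoop (missing_set : PySem.Set Int) (run : Int) (d : Int) : Int :=
  if h : d ≥ 1 ∧ PySem.Set.contains missing_set d = true then
    pvALoop missing_set (run + 1) (d - 1)
  else run
termination_by d.toNat
decreasing_by omega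

def max_consecutive_run_py (missing : List Int) (total_days : Int) : Int :=
  if missing = [] then 0
  else
    let missing_set := PySem.Set.ofList missing
    pvALoop missing_set 0 total_days

-- ===== PORT B =====
-- the 'for v in sorted(...): if expected >= 1 and v == expected: ... else: break' loop
def pvBScan (run : Int) (expected : Int) : List Int → Int
  | [] => run
  | v :: rest =>
    if expected ≥ 1 ∧ v = expected then pvBScan (run + 1) (expected - 1) rest
    else run

def max_consecutive_run_py_alt (missing : List Int) (total_days : Int) : Int :=
  pvBScan 0 total_days
    (PySem.List.sorted (PySem.Set.ofList (missing.filter (fun v => v ≤ total_days)))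
      (fun x => x) true)

-- ===== PRECONDITION & SPEC =====
def Spec_max_consecutive_run_py (missing : List Int) (total_days : Int) (out : Int) : Prop := out = max_consecutive_run_py_alt missing total_days
instance (missing : List Int) (total_days : Int) (out : Int) : Decidable (Spec_max_consecutive_run_py missing total_days out) := by unfold Spec_max_consecutive_run_py; infer_instance

-- ===== CLAIM (what is proved, stated in full; the proofs are below) =====
def Claim_equal_max_consecutive_run_py : Prop := ∀ (missing : List Int) (total_days : Int), Dom_max_consecutive_run_py missing total_days → Spec_max_consecutive_run_py missing total_days (max_consecutive_run_py missing total_days)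

-- ===== LEMMAS AND PROOFS =====

-- abstract description of the trailing run length both loops compute
def pvCnt (xs : List Int) (d : Int) : Int :=
  if h : d ≥ 1 ∧ d ∈ xs then 1 + pvCnt xs (d - 1) else 0
termination_by d.toNat
decreasing_by omega

theorem pvALoop_eq_cnt (xs : List Int) (run d : Int) :
    pvALoop xs run d = run + pvCnt xs d := by
  induction hd : d.toNat using Nat.strong_induction_on generalizing run d with
  | _ n ih =>
    rw [pvALoop, pvCnt]
    by_cases h : d ≥ 1 ∧ d ∈ xs
    · have hc : PySem.Set.contains xs d = true := (PySem.Set.contains_iff xs d).mpr h.2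
      rw [dif_pos ⟨h.1, hc⟩, dif_pos h, ih (d - 1).toNat (by omega) (run + 1) (d - 1) rfl]
      ring
    · have hc : ¬ (d ≥ 1 ∧ PySem.Set.contains xs d = true) := by
        intro hh; exact h ⟨hh.1, (PySem.Set.contains_iff xs d).mp hh.2⟩
      rw [dif_neg hc, dif_neg h]; ring

theorem pvBScan_eq_cnt (xs : List Int) (L : List Int) (run d : Int)
    (hpw : L.Pairwise (· > ·))
    (hmem : ∀ v, v ∈ L ↔ v ∈ xs ∧ v ≤ d) :
    pvBScan run d L = run + pvCnt xs d := by
  induction hd : d.toNat using Nat.strong_induction_on generalizing run d L with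
  | _ n ih =>
    rw [pvCnt]
    by_cases h : d ≥ 1 ∧ d ∈ xs
    · have hdL : d ∈ L := (hmem d).mpr ⟨h.2, le_refl d⟩
      rw [dif_pos h]
      cases L with
      | nil => simp at hdL
      | cons v rest =>
        have hv : v = d := by
          rcases List.mem_cons.mp hdL with h' | h'
          · omega
          · have h1 := (List.pairwise_cons.mp hpw).1 d h'
            have hvle : v ≤ d := ((hmem v).mp List.mem_cons_self).2
            omega
        rw [pvBScan, if_pos ⟨h.1, hv⟩]
        have hpw' := (List.pairwise_cons.mp hpw).2
        have hmem' : ∀ u, u ∈ rest ↔ u ∈ xs ∧ u ≤ d - 1 := by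
          intro u
          constructor
          · intro hu
            have hlt : u < v := (List.pairwise_cons.mp hpw).1 u hu
            have hm := (hmem u).mp (List.mem_cons_of_mem v hu)
            exact ⟨hm.1, by omega⟩
          · intro ⟨hu, hle⟩
            have hm : u ∈ v :: rest := (hmem u).mpr ⟨hu, by omega⟩
            rcases List.mem_cons.mp hm with h' | h'
            · omega
            · exact h'
        rw [ih (d - 1).toNat (by omega) rest (run + 1) (d - 1) hpw' hmem' rfl]
        ring
    · rw [dif_neg h]
      cases L with
      | nil => simp [pvBScan]
      | cons v rest =>
        have hv := (hmem v).mp List.mem_cons_self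
        rw [pvBScan, if_neg (by
          intro hh
          exact h ⟨hh.1, hh.2 ▸ hv.1⟩)]
        ring

theorem pvSortedDesc_pairwise (xs : List Int) :
    (PySem.List.sorted (PySem.Set.ofList xs) (fun x => x) true).Pairwise (· > ·) := by
  have h1 := PySem.List.sorted_pairwise_rev (xs := PySem.Set.ofList xs)
    (key := fun x : Int => x)
  have h2 : (PySem.List.sorted (PySem.Set.ofList xs) (fun x => x) true).Nodup := by
    exact (PySem.List.sorted_perm (xs := PySem.Set.ofList xs)
      (key := fun x : Int => x) (rev := true)).nodup_iff.mpr (PySem.Set.nodup_ofList xs)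
  have := h1.and h2
  exact this.imp (fun {a b} ⟨hle, hne⟩ => by omega)

-- ===== VERDICT (by name: the statement is the Claim_ definition above) =====
theorem max_consecutive_run_py_spec : Claim_equal_max_consecutive_run_py := by
  intro missing total_days _
  unfold Spec_max_consecutive_run_py max_consecutive_run_py max_consecutive_run_py_alt
  have hB := pvBScan_eq_cnt (PySem.Set.ofList missing)
    (PySem.List.sorted (PySem.Set.ofList (missing.filter (fun v => v ≤ total_days)))
      (fun x => x) true) 0 total_days
    (pvSortedDesc_pairwise _)
    (by
      intro v
      rw [PySem.List.mem_sorted, PySem.Set.mem_ofList, List.mem_filter,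
        PySem.Set.mem_ofList]
      simp)
  rw [hB]
  by_cases hnil : missing = []
  · subst hnil
    rw [if_pos rfl, pvCnt, dif_neg (by simp)]; ring
  · rw [if_neg hnil]
    exact pvALoop_eq_cnt _ 0 total_days
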